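-- pv_equiv track=rewrite | github.com/wei134102/AuroraDbManager_wei | generate_lua_filters.py | categorize_games
-- ===== SOURCE A (Python) =====
-- def categorize_games(games):
--     """按类别对游戏进行分类 - 直接使用原始分类名称"""
--     categories = {}
--
--     for game in games:
--         category = game.get('category', 'Unknown')
--
--         if category not in categories:
--             categories[category] = []
--
--         if game['hex_id']:
--             categories[category].append(game)
--
--     return categories
-- ===== SOURCE B (Python) =====
-- def categorize_games(games):
--     """按类别对游戏进行分类 - 直接使用原始分类名称"""
--     # distinct categories in first-occurrence order, then one filtration per category
--     cats = list(dict.fromkeys(g.get('category', 'Unknown') for g in games))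
--     return {c: [g for g in games
--                 if g.get('category', 'Unknown') == c and g['hex_id']]
--             for c in cats}
-- ===== Notes on version B (the rewrite author's own statement) =====
-- stated objective: alternative
-- what changed: Replaces the single-pass incremental dict grouping (conditional key creation + conditional append per game) by a non-mutating two-stage algorithm: an ordered dedup of all category names followed by one whole-list filtration per category.
import Mathlib
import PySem

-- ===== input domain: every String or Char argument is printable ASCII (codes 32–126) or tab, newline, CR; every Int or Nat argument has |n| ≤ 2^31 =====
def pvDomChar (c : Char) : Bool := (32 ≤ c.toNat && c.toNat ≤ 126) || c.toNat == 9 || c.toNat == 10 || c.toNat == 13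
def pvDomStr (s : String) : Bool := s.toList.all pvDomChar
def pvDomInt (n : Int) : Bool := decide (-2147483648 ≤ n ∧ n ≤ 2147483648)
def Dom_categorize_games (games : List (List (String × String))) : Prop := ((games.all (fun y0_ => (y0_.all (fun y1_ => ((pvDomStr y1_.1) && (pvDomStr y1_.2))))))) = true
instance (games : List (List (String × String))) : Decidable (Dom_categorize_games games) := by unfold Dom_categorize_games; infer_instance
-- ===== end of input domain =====

-- B replaces the incremental dict grouping by an ordered dedup of the categories followed by
-- one whole-list filtration per category; equivalence of the RETURN value is proved.

-- shared primitives: a game arrives as a dict (association list); lookups go through PySem.Dict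
def pvCat (g : List (String × String)) : String :=
  (PySem.Dict.ofList g).getD "category" "Unknown"     -- game.get('category', 'Unknown')

def pvTruthy (g : List (String × String)) : Bool :=
  (PySem.Dict.ofList g).getD "hex_id" "" ≠ ""         -- truthiness of game['hex_id'] (Pre_ guarantees the key)

def pvItems (g : List (String × String)) : List (String × String) :=
  (PySem.Dict.ofList g).items                          -- the game dict itself, as items

-- ===== PORT A =====
def categorize_games (games : List (List (String × String))) : List (String × List (List (String × String))) :=
  (games.foldl (fun cats g =>
      let c := pvCat g
      let cats := if cats.contains c then cats else cats.insert c []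
      if pvTruthy g then cats.modify c [] (fun l => l ++ [pvItems g]) else cats)
    PySem.Dict.empty).items

-- ===== PORT B =====
def categorize_games_alt (games : List (List (String × String))) : List (String × List (List (String × String))) :=
  let cats := PySem.List.dedup (games.map pvCat)       -- list(dict.fromkeys(...))
  (cats.foldl (fun d c =>
      d.insert c ((games.filter (fun g => pvCat g == c && pvTruthy g)).map pvItems))
    PySem.Dict.empty).items                            -- the dict comprehension

-- ===== PRECONDITION & SPEC =====
-- A raises KeyError on game['hex_id'] when a game lacks the 'hex_id' key (B raises there too); exactly those inputs are excluded.
def Pre_categorize_games (games : List (List (String × String))) : Prop :=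
  ∀ g ∈ games, "hex_id" ∈ g.map Prod.fst
instance (games : List (List (String × String))) : Decidable (Pre_categorize_games games) := by unfold Pre_categorize_games; infer_instance

def pvWitness_categorize_games : (List (List (String × String))) :=
  [[("category", "Action"), ("hex_id", "ab12")], [("hex_id", "")]]

def Spec_categorize_games (games : List (List (String × String))) (out : List (String × List (List (String × String)))) : Prop := out = categorize_games_alt games
instance (games : List (List (String × String))) (out : List (String × List (List (String × String)))) : Decidable (Spec_categorize_games games out) := by unfold Spec_categorize_games; infer_instance

-- ===== CLAIM (what is proved, stated in full; the proofs are below) =====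
def Claim_equal_categorize_games : Prop := ∀ (games : List (List (String × String))), Dom_categorize_games games → Pre_categorize_games games → Spec_categorize_games games (categorize_games games)

-- ===== LEMMAS AND PROOFS =====

-- the common normal form: distinct categories in first-occurrence order, each with its filtered games
def pvSpecList (games : List (List (String × String))) : List (String × List (List (String × String))) :=
  (PySem.List.dedup (games.map pvCat)).map (fun c =>
    (c, (games.filter (fun g => pvCat g == c && pvTruthy g)).map pvItems))

-- A's loop body, named
def pvStepA (d : PySem.Dict String (List (List (String × String)))) (g : List (String × String)) :
    PySem.Dict String (List (List (String × String))) :=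
  let c := pvCat g
  let d := if d.contains c then d else d.insert c []
  if pvTruthy g then d.modify c [] (fun l => l ++ [pvItems g]) else d

lemma pvPortA_eq (games : List (List (String × String))) :
    categorize_games games = (games.foldl pvStepA PySem.Dict.empty).items := rfl

-- B's dict comprehension runs over nodup keys, so its items are exactly the mapped list
lemma pvPortB_eq (games : List (List (String × String))) :
    categorize_games_alt games = pvSpecList games := by
  have h := PySem.Dict.items_foldl_insert_fresh (PySem.List.dedup (games.map pvCat))
      (fun c => c)
      (fun c => (games.filter (fun g => pvCat g == c && pvTruthy g)).map pvItems)
      PySem.Dict.empty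
      (fun a _ => PySem.Dict.contains_empty a)
      (by simpa using PySem.List.nodup_dedup (games.map pvCat))
  unfold categorize_games_alt pvSpecList
  simpa [PySem.Dict.empty, PySem.Dict.items] using h

-- A's fold reaches the same normal form (reverse induction on the game list)
lemma pvPortA_spec (games : List (List (String × String))) :
    (games.foldl pvStepA PySem.Dict.empty).items = pvSpecList games := by
  induction games using List.reverseRecOn with
  | nil => rfl
  | append_singleton gs g ih =>
    have hkeys : (gs.foldl pvStepA PySem.Dict.empty).keys
        = PySem.Set.ofList (gs.map pvCat) := by
      show ((gs.foldl pvStepA PySem.Dict.empty).items.map Prod.fst) = _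
      rw [ih]; unfold pvSpecList; rw [List.map_map, PySem.List.dedup_eq_ofList]
      exact (List.map_congr_left (fun c _ => rfl)).trans (List.map_id _)
    have hnd : (gs.foldl pvStepA PySem.Dict.empty).keys.Nodup := by
      rw [hkeys]; exact PySem.Set.nodup_ofList _
    set d := gs.foldl pvStepA PySem.Dict.empty with hd
    rw [List.foldl_append, List.foldl_cons, List.foldl_nil, ← hd]
    unfold pvSpecList
    have hKnew : PySem.List.dedup ((gs ++ [g]).map pvCat)
        = PySem.Set.add (PySem.Set.ofList (gs.map pvCat)) (pvCat g) := by
      simp [PySem.List.dedup_eq_ofList, PySem.Set.ofList_append_singleton]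
    rw [hKnew]
    by_cases hc : d.contains (pvCat g) = true
    · -- category already present
      have hmemK : pvCat g ∈ PySem.Set.ofList (gs.map pvCat) := by
        rw [← hkeys]
        exact (PySem.Dict.contains_iff_mem_keys _ _).1 hc
      have hadd : PySem.Set.add (PySem.Set.ofList (gs.map pvCat)) (pvCat g)
          = PySem.Set.ofList (gs.map pvCat) := by
        unfold PySem.Set.add
        simp [PySem.Set.contains, hmemK]
      rw [hadd]
      by_cases ht : pvTruthy g = true
      · -- append pvItems g to the bucket of pvCat g
        have hstep : pvStepA d g
            = d.insert (pvCat g) (d.getD (pvCat g) [] ++ [pvItems g]) := by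
          simp only [pvStepA, PySem.Dict.modify, hc, ht, if_true]
        rw [hstep, PySem.Dict.items_insert_of_contains _ _ hc, ih]
        unfold pvSpecList
        rw [PySem.List.dedup_eq_ofList, List.map_map]
        refine List.map_congr_left (fun c hcK => ?_)
        have hcIn : (c, (gs.filter (fun g' => pvCat g' == c && pvTruthy g')).map pvItems)
            ∈ d.items := by
          rw [ih]; unfold pvSpecList
          rw [PySem.List.dedup_eq_ofList]
          exact List.mem_map.2 ⟨c, hcK, rfl⟩
        by_cases hce : c = pvCat g
        · have hget : d.getD c [] = (gs.filter (fun g' => pvCat g' == c && pvTruthy g')).map pvItems :=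
            PySem.Dict.getD_of_mem_items d hcIn hnd []
          have hb' : (pvCat g == c) = true := by simpa using hce.symm
          simp [← hce, hget, List.filter_append, hb', ht]
        · have hb : (c == pvCat g) = false := by simpa using hce
          simp only [Function.comp_apply, hb, Bool.false_eq_true, if_false]
          have hne : (pvCat g == c) = false := by simpa using (Ne.symm hce)
          simp [List.filter_append, hne]
      · -- hex_id falsy: nothing appended, and every filter gains nothing
        have hstep : pvStepA d g = d := by
          simp only [pvStepA, hc, ht, if_true, if_false, Bool.false_eq_true]
        rw [hstep, ih]
        unfold pvSpecList
        rw [PySem.List.dedup_eq_ofList]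
        refine List.map_congr_left (fun c _ => ?_)
        have hb : (pvCat g == c && pvTruthy g) = false := by simp [ht]
        simp [List.filter_append, hb]
    · -- fresh category: appended at the end
      have hc' : d.contains (pvCat g) = false := by simpa using hc
      have hnotmem : pvCat g ∉ PySem.Set.ofList (gs.map pvCat) := by
        rw [← hkeys]
        intro hm; exact hc ((PySem.Dict.contains_iff_mem_keys _ _).2 hm)
      have hadd : PySem.Set.add (PySem.Set.ofList (gs.map pvCat)) (pvCat g)
          = PySem.Set.ofList (gs.map pvCat) ++ [pvCat g] := by
        unfold PySem.Set.add
        simp [PySem.Set.contains, hnotmem]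
      rw [hadd, List.map_append]
      -- no game of gs has category pvCat g, so its old bucket is empty
      have hfilter : gs.filter (fun g' => pvCat g' == pvCat g && pvTruthy g') = [] := by
        rw [List.filter_eq_nil_iff]
        intro g' hg' hp
        simp only [Bool.and_eq_true, beq_iff_eq] at hp
        exact hnotmem ((PySem.Set.mem_ofList _ _).2 (hp.1 ▸ List.mem_map.2 ⟨g', hg', rfl⟩))
      -- old buckets are unchanged by the appended game
      have hold : (PySem.Set.ofList (gs.map pvCat)).map (fun c =>
            (c, ((gs ++ [g]).filter (fun g' => pvCat g' == c && pvTruthy g')).map pvItems))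
          = (PySem.Set.ofList (gs.map pvCat)).map (fun c =>
            (c, (gs.filter (fun g' => pvCat g' == c && pvTruthy g')).map pvItems)) := by
        refine List.map_congr_left (fun c hcK => ?_)
        have hne : (pvCat g == c) = false := by
          simp only [beq_eq_false_iff_ne, ne_eq]
          rintro rfl; exact hnotmem hcK
        simp [List.filter_append, hne]
      by_cases ht : pvTruthy g = true
      · have hstep : pvStepA d g
            = (d.insert (pvCat g) []).insert (pvCat g)
                ((d.insert (pvCat g) []).getD (pvCat g) [] ++ [pvItems g]) := by
          simp only [pvStepA, PySem.Dict.modify, hc', ht, if_true, if_false, Bool.false_eq_true]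
        have hcc : (d.insert (pvCat g) []).contains (pvCat g) = true :=
          PySem.Dict.contains_insert_self _ _ _
        rw [hstep, PySem.Dict.items_insert_of_contains _ _ hcc,
            PySem.Dict.getD_insert_self,
            PySem.Dict.items_insert_of_not_contains _ _ hc',
            List.map_append, ih]
        unfold pvSpecList
        rw [PySem.List.dedup_eq_ofList, List.map_map, hold]
        congr 1
        · refine List.map_congr_left (fun c hcK => ?_)
          have hne : (c == pvCat g) = false := by
            simp only [beq_eq_false_iff_ne, ne_eq]
            rintro rfl; exact hnotmem hcK
          simp
          intro h; exact absurd h (by simpa using hne)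
        · simp [List.filter_append, hfilter, ht]
      · have hstep : pvStepA d g = d.insert (pvCat g) [] := by
          simp only [pvStepA, hc', ht, if_false, Bool.false_eq_true]
        rw [hstep, PySem.Dict.items_insert_of_not_contains _ _ hc', ih]
        unfold pvSpecList
        rw [PySem.List.dedup_eq_ofList, hold]
        congr 1
        have htf : pvTruthy g = false := by simpa using ht
        simp [List.filter_append, hfilter, htf]

-- ===== VERDICT (by name: the statement is the Claim_ definition above) =====
theorem categorize_games_spec : Claim_equal_categorize_games := by
  intro games _ _
  unfold Spec_categorize_games
  rw [pvPortA_eq, pvPortB_eq, pvPortA_spec]
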